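-- pv_equiv track=rewrite | github.com/gautham9566/Placements_devcorp | video/microservices/transcoding_service/main.py | _get_quality_label_from_resolution
-- ===== SOURCE A (Python) =====
-- def _get_quality_label_from_resolution(width: int, height: int) -> str:
--     """Map resolution to quality label like '1080p', '720p', etc."""
--     if height <= 0:
--         return "unknown"
--
--     quality_map = {
--         2160: "2160p",
--         1440: "1440p",
--         1080: "1080p",
--         720: "720p",
--         480: "480p",
--         360: "360p",
--         240: "240p"
--     }
--
--     for h, label in quality_map.items():
--         if height >= h:
--             return label
--
--     return f"{height}p"
-- ===== SOURCE B (Python) =====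
-- import bisect
--
-- _THRESHOLDS = [240, 360, 480, 720, 1080, 1440, 2160]
-- _LABELS = ["240p", "360p", "480p", "720p", "1080p", "1440p", "2160p"]
--
-- def _get_quality_label_from_resolution(width: int, height: int) -> str:
--     """Map resolution to quality label like '1080p', '720p', etc."""
--     if height <= 0:
--         return "unknown"
--     i = bisect.bisect_right(_THRESHOLDS, height)
--     if i == 0:
--         return f"{height}p"
--     return _LABELS[i - 1]
-- ===== Notes on version B (the rewrite author's own statement) =====
-- stated objective: idiomatic
-- what changed: Replaces the descending linear scan over a dict with an ascending thresholds list indexed by bisect_right into a parallel labels list.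
import Mathlib
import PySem

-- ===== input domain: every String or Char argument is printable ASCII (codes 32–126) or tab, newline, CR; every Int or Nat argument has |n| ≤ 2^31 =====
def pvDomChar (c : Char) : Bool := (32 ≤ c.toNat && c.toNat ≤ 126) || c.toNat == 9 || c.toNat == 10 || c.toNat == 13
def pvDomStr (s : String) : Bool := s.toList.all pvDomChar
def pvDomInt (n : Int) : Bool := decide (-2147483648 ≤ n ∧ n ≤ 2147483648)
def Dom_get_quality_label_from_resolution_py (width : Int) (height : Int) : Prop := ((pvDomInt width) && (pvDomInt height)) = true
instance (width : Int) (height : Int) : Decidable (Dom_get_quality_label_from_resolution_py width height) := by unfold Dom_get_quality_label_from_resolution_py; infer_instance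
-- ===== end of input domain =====

-- B replaces A's descending linear dict scan with an ascending thresholds list and a bisect_right lookup (idiomatic).


-- ===== PORT A =====
-- Port of A: descending scan over the quality dict, first threshold ≤ height wins.
def pvQualityMap : List (Int × String) :=
  [(2160, "2160p"), (1440, "1440p"), (1080, "1080p"), (720, "720p"),
   (480, "480p"), (360, "360p"), (240, "240p")]

def pvScan : List (Int × String) → Int → Option String
  | [], _ => none
  | (h, label) :: rest, height =>
      if height ≥ h then some label else pvScan rest height

def get_quality_label_from_resolution_py (width : Int) (height : Int) : String :=
  if height ≤ 0 then "unknown"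
  else
    match pvScan pvQualityMap height with
    | some label => label
    | none => PySem.Int.toStr height ++ "p"

-- ===== PORT B =====
-- Port of B: bisect_right over the ascending thresholds list, parallel labels list.
def pvThresholds : List Int := [240, 360, 480, 720, 1080, 1440, 2160]
def pvLabels : List String := ["240p", "360p", "480p", "720p", "1080p", "1440p", "2160p"]

-- bisect.bisect_right on a sorted list (ported as the first-position recursion).
def pvBisectRight : List Int → Int → Nat
  | [], _ => 0
  | t :: rest, x => if x < t then 0 else 1 + pvBisectRight rest x

def get_quality_label_from_resolution_py_alt (width : Int) (height : Int) : String :=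
  if height ≤ 0 then "unknown"
  else
    let i := pvBisectRight pvThresholds height
    if i = 0 then PySem.Int.toStr height ++ "p"
    else (pvLabels[i - 1]?).getD ""

-- ===== PRECONDITION & SPEC =====
def Spec_get_quality_label_from_resolution_py (width : Int) (height : Int) (out : String) : Prop := out = get_quality_label_from_resolution_py_alt width height
instance (width : Int) (height : Int) (out : String) : Decidable (Spec_get_quality_label_from_resolution_py width height out) := by unfold Spec_get_quality_label_from_resolution_py; infer_instance

-- ===== CLAIM (what is proved, stated in full; the proofs are below) =====
def Claim_equal_get_quality_label_from_resolution_py : Prop := ∀ (width : Int) (height : Int), Dom_get_quality_label_from_resolution_py width height → Spec_get_quality_label_from_resolution_py width height (get_quality_label_from_resolution_py width height)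

-- ===== LEMMAS AND PROOFS =====

-- ===== VERDICT (by name: the statement is the Claim_ definition above) =====
set_option maxHeartbeats 2000000 in
theorem get_quality_label_from_resolution_py_spec : Claim_equal_get_quality_label_from_resolution_py := by
  intro width height _
  unfold Spec_get_quality_label_from_resolution_py
  unfold get_quality_label_from_resolution_py get_quality_label_from_resolution_py_alt
  simp only [pvQualityMap, pvThresholds, pvLabels, pvScan, pvBisectRight]
  split_ifs <;> simp_all <;> omega
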